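-- pv_equiv track=rewrite | github.com/Kittyheart20/AI-Python-Projects | mp03/submitted.py | create_viterbi_frequency_table
-- ===== SOURCE A (Python) =====
-- from collections import defaultdict, Counter
--
-- def create_viterbi_frequency_table(train):
--         tagFrequency = {}
--         tagTransition = {}
--         tagStart = Counter()
--
--         for sentence in train:
--                 prevTag = None
--
--                 for word, tag in sentence:
--                         if tag not in tagFrequency:
--                                 tagFrequency[tag] = Counter()
--
--                         tagFrequency[tag].update([word])
--
--                         if (prevTag != None and prevTag != 'START'):
--                                 if prevTag not in tagTransition:
--                                         tagTransition[prevTag] = Counter()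
--
--                                 tagTransition[prevTag].update([tag])
--
--                         if prevTag == 'START':
--                                 tagStart.update([tag])
--                         prevTag = tag
--
--         return tagFrequency, tagTransition, tagStart
-- ===== SOURCE B (Python) =====
-- from collections import Counter
--
-- def create_viterbi_frequency_table(train):
--     # pass 1: word frequency per tag
--     tagFrequency = {}
--     for sentence in train:
--         for word, tag in sentence:
--             tagFrequency.setdefault(tag, Counter())[word] += 1
--     # pass 2: transitions / starts from consecutive pairs
--     tagTransition = {}
--     tagStart = Counter()
--     for sentence in train:
--         sent = list(sentence)
--         for (_, prevTag), (_, tag) in zip(sent, sent[1:]):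
--             if prevTag == 'START':
--                 tagStart[tag] += 1
--             else:
--                 tagTransition.setdefault(prevTag, Counter())[tag] += 1
--     return tagFrequency, tagTransition, tagStart
-- ===== Notes on version B (the rewrite author's own statement) =====
-- stated objective: alternative
-- what changed: Replaces A's single interleaved scan that threads a running prevTag through all three tables with two independent passes: one per-(word,tag) pass building tagFrequency via setdefault, and one pass over consecutive pairs zip(sent, sent[1:]) that classifies each pair as a start (prev=='START') or a transition, eliminating the prevTag state variable.
import Mathlib
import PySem

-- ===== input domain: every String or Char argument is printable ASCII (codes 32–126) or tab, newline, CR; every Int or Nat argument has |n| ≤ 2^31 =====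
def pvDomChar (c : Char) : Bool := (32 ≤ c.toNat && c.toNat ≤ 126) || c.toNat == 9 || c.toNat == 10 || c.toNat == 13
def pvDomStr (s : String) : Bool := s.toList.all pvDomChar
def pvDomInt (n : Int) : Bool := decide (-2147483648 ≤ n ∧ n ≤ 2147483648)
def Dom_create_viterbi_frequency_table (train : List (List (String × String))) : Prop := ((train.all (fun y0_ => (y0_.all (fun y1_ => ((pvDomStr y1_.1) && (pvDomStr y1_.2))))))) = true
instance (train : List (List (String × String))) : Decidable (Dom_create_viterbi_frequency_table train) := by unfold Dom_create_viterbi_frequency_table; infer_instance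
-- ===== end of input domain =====

-- B replaces A's single interleaved scan with a running prevTag by two separate passes
-- (one per-pair pass for tag frequencies, one over consecutive pairs via zip for
-- transitions/starts); objective: simpler decomposition, same cost.

-- ===== PORT A =====
-- state: (tagFrequency, tagTransition, tagStart, prevTag)
def pvStepA (st : PySem.Dict String (PySem.Dict String Int) × PySem.Dict String (PySem.Dict String Int) × PySem.Dict String Int × Option String)
    (wt : String × String) :
    PySem.Dict String (PySem.Dict String Int) × PySem.Dict String (PySem.Dict String Int) × PySem.Dict String Int × Option String :=
  let tf := st.1; let tt := st.2.1; let ts := st.2.2.1; let prev := st.2.2.2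
  let word := wt.1; let tag := wt.2
  -- if tag not in tagFrequency: tagFrequency[tag] = Counter()
  let tf1 := if tf.contains tag then tf else tf.insert tag PySem.Dict.empty
  -- tagFrequency[tag].update([word])
  let tf2 := tf1.insert tag ((tf1.getD tag PySem.Dict.empty).modify word 0 (· + 1))
  -- if prevTag != None and prevTag != 'START': tagTransition[prevTag].update([tag])
  let tt2 := match prev with
    | none => tt
    | some p =>
        if p ≠ "START" then
          let tt1 := if tt.contains p then tt else tt.insert p PySem.Dict.empty
          tt1.insert p ((tt1.getD p PySem.Dict.empty).modify tag 0 (· + 1))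
        else tt
  -- if prevTag == 'START': tagStart.update([tag])
  let ts2 := if prev = some "START" then ts.modify tag 0 (· + 1) else ts
  (tf2, tt2, ts2, some tag)

def create_viterbi_frequency_table (train : List (List (String × String))) : (List (String × List (String × Int))) × (List (String × List (String × Int))) × (List (String × Int)) :=
  let fin := train.foldl
    (fun (st : PySem.Dict String (PySem.Dict String Int) × PySem.Dict String (PySem.Dict String Int) × PySem.Dict String Int) sentence =>
      let r := sentence.foldl pvStepA (st.1, st.2.1, st.2.2, none)    -- prevTag = None
      (r.1, r.2.1, r.2.2.1))
    (PySem.Dict.empty, PySem.Dict.empty, PySem.Dict.empty)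
  (fin.1.items.map (fun p => (p.1, p.2.items)),
   fin.2.1.items.map (fun p => (p.1, p.2.items)),
   fin.2.2.items)

-- ===== PORT B =====
-- tagFrequency.setdefault(tag, Counter())[word] += 1
def pvStepF (tf : PySem.Dict String (PySem.Dict String Int)) (wt : String × String) :
    PySem.Dict String (PySem.Dict String Int) :=
  (tf.setdefault wt.2 PySem.Dict.empty).modify wt.2 PySem.Dict.empty (fun c => c.modify wt.1 0 (· + 1))

-- for (_, prevTag), (_, tag) in zip(sent, sent[1:]): …
def pvStepP (acc : PySem.Dict String (PySem.Dict String Int) × PySem.Dict String Int)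
    (pr : (String × String) × (String × String)) :
    PySem.Dict String (PySem.Dict String Int) × PySem.Dict String Int :=
  let prev := pr.1.2; let tag := pr.2.2
  if prev = "START" then (acc.1, acc.2.modify tag 0 (· + 1))
  else ((acc.1.setdefault prev PySem.Dict.empty).modify prev PySem.Dict.empty (fun c => c.modify tag 0 (· + 1)), acc.2)

def create_viterbi_frequency_table_alt (train : List (List (String × String))) : (List (String × List (String × Int))) × (List (String × List (String × Int))) × (List (String × Int)) :=
  let tf := train.foldl (fun tf sentence => sentence.foldl pvStepF tf) PySem.Dict.empty
  let tp := train.foldl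
    (fun acc sentence => (sentence.zip (PySem.List.slice sentence (some 1) none)).foldl pvStepP acc)
    (PySem.Dict.empty, PySem.Dict.empty)
  (tf.items.map (fun p => (p.1, p.2.items)),
   tp.1.items.map (fun p => (p.1, p.2.items)),
   tp.2.items)

-- ===== PRECONDITION & SPEC =====
def Spec_create_viterbi_frequency_table (train : List (List (String × String))) (out : (List (String × List (String × Int))) × (List (String × List (String × Int))) × (List (String × Int))) : Prop := out = create_viterbi_frequency_table_alt train
instance (train : List (List (String × String))) (out : (List (String × List (String × Int))) × (List (String × List (String × Int))) × (List (String × Int))) : Decidable (Spec_create_viterbi_frequency_table train out) := by unfold Spec_create_viterbi_frequency_table; infer_instance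

-- ===== CLAIM (what is proved, stated in full; the proofs are below) =====
def Claim_equal_create_viterbi_frequency_table : Prop := ∀ (train : List (List (String × String))), Dom_create_viterbi_frequency_table train → Spec_create_viterbi_frequency_table train (create_viterbi_frequency_table train)

-- ===== LEMMAS AND PROOFS =====

-- a fresh-key insert is an append (packaged form of items_insert_of_not_contains)
theorem pvInsert_fresh {v_ : Type} (d : PySem.Dict String v_) (k : String) (v : v_)
    (h : d.contains k = false) : d.insert k v = PySem.Dict.mk (d.items ++ [(k, v)]) :=
  PySem.Dict.ext (PySem.Dict.items_insert_of_not_contains d v h)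

-- the tagFrequency update of A's step equals B's pvStepF
theorem pvStepA_fst (st : PySem.Dict String (PySem.Dict String Int) × PySem.Dict String (PySem.Dict String Int) × PySem.Dict String Int × Option String)
    (wt : String × String) : (pvStepA st wt).1 = pvStepF st.1 wt := by
  by_cases h : st.1.contains wt.2
  · simp [pvStepA, pvStepF, PySem.Dict.setdefault, PySem.Dict.modify, h]
  · have hf : st.1.contains wt.2 = false := by simpa using h
    simp [pvStepA, pvStepF, PySem.Dict.setdefault, PySem.Dict.modify, h,
      ← pvInsert_fresh st.1 wt.2 PySem.Dict.empty hf]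

-- A's inner fold: the tagFrequency component is B's frequency fold
theorem pvInner_fst (s : List (String × String))
    (tf tt : PySem.Dict String (PySem.Dict String Int)) (ts : PySem.Dict String Int)
    (prev : Option String) :
    (s.foldl pvStepA (tf, tt, ts, prev)).1 = s.foldl pvStepF tf := by
  induction s generalizing tf tt ts prev with
  | nil => rfl
  | cons x rest ih =>
      simp only [List.foldl_cons]
      rw [show pvStepA (tf, tt, ts, prev) x
            = ((pvStepA (tf, tt, ts, prev) x).1, (pvStepA (tf, tt, ts, prev) x).2.1,
               (pvStepA (tf, tt, ts, prev) x).2.2.1, (pvStepA (tf, tt, ts, prev) x).2.2.2) from rfl,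
          ih, pvStepA_fst]

-- A's transition/start step with a known previous tag equals B's pair step
theorem pvStepA_pair (tf tt : PySem.Dict String (PySem.Dict String Int)) (ts : PySem.Dict String Int)
    (d x : String × String) :
    ((pvStepA (tf, tt, ts, some d.2) x).2.1, (pvStepA (tf, tt, ts, some d.2) x).2.2.1)
      = pvStepP (tt, ts) (d, x) := by
  by_cases h : d.2 = "START"
  · simp [pvStepA, pvStepP, h]
  · by_cases hc : tt.contains d.2
    · simp [pvStepA, pvStepP, h, hc, PySem.Dict.setdefault, PySem.Dict.modify]
    · have hf : tt.contains d.2 = false := by simpa using hc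
      simp [pvStepA, pvStepP, h, hc, PySem.Dict.setdefault, PySem.Dict.modify,
        ← pvInsert_fresh tt d.2 PySem.Dict.empty hf]

-- A's inner fold from a known previous element: transition/start components are B's pair fold
theorem pvInner_pairs (s : List (String × String)) (d : String × String)
    (tf tt : PySem.Dict String (PySem.Dict String Int)) (ts : PySem.Dict String Int) :
    ((s.foldl pvStepA (tf, tt, ts, some d.2)).2.1, (s.foldl pvStepA (tf, tt, ts, some d.2)).2.2.1)
      = ((d :: s).zip s).foldl pvStepP (tt, ts) := by
  induction s generalizing d tf tt ts with
  | nil => rfl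
  | cons y rest ih =>
      simp only [List.foldl_cons, List.zip_cons_cons]
      rw [show pvStepA (tf, tt, ts, some d.2) y
            = ((pvStepA (tf, tt, ts, some d.2) y).1, (pvStepA (tf, tt, ts, some d.2) y).2.1,
               (pvStepA (tf, tt, ts, some d.2) y).2.2.1, (pvStepA (tf, tt, ts, some d.2) y).2.2.2) from rfl]
    -- the prev component after the step is some y.2
      rw [show (pvStepA (tf, tt, ts, some d.2) y).2.2.2 = some y.2 from rfl, ih,
          ← pvStepA_pair tf tt ts d y]

-- per sentence, starting with prevTag = None
theorem pvInner_pairs_none (s : List (String × String))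
    (tf tt : PySem.Dict String (PySem.Dict String Int)) (ts : PySem.Dict String Int) :
    ((s.foldl pvStepA (tf, tt, ts, none)).2.1, (s.foldl pvStepA (tf, tt, ts, none)).2.2.1)
      = (s.zip (PySem.List.slice s (some 1) none)).foldl pvStepP (tt, ts) := by
  cases s with
  | nil => rfl
  | cons x rest =>
      rw [PySem.List.slice_from_one]
      simp only [List.foldl_cons, List.tail_cons]
      rw [show pvStepA (tf, tt, ts, none) x = (pvStepF tf x, tt, ts, some x.2) from by
            rw [← pvStepA_fst (tf, tt, ts, none) x]; rfl]
      exact pvInner_pairs rest x (pvStepF tf x) tt ts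

-- the outer fold factors into B's two outer folds
theorem pvOuter (train : List (List (String × String)))
    (tf tt : PySem.Dict String (PySem.Dict String Int)) (ts : PySem.Dict String Int) :
    train.foldl
      (fun (st : PySem.Dict String (PySem.Dict String Int) × PySem.Dict String (PySem.Dict String Int) × PySem.Dict String Int) sentence =>
        let r := sentence.foldl pvStepA (st.1, st.2.1, st.2.2, none)
        (r.1, r.2.1, r.2.2.1)) (tf, tt, ts)
      = (train.foldl (fun tf sentence => sentence.foldl pvStepF tf) tf,
         train.foldl (fun acc sentence => (sentence.zip (PySem.List.slice sentence (some 1) none)).foldl pvStepP acc) (tt, ts)) := by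
  induction train generalizing tf tt ts with
  | nil => rfl
  | cons s rest ih =>
      simp only [List.foldl_cons]
      rw [pvInner_fst s tf tt ts none]
      have h := pvInner_pairs_none s tf tt ts
      have h1 : (s.foldl pvStepA (tf, tt, ts, none)).2.1
          = ((s.zip (PySem.List.slice s (some 1) none)).foldl pvStepP (tt, ts)).1 := by
        rw [← h]
      have h2 : (s.foldl pvStepA (tf, tt, ts, none)).2.2.1
          = ((s.zip (PySem.List.slice s (some 1) none)).foldl pvStepP (tt, ts)).2 := by
        rw [← h]
      rw [h1, h2, ih]

-- ===== VERDICT (by name: the statement is the Claim_ definition above) =====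
theorem create_viterbi_frequency_table_spec : Claim_equal_create_viterbi_frequency_table := by
  intro train _
  unfold Spec_create_viterbi_frequency_table create_viterbi_frequency_table create_viterbi_frequency_table_alt
  rw [pvOuter]
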